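-- pv_equiv track=rewrite | github.com/boguckicollection/kartotekaPRO | backend/app/attributes.py | _best_option_id
-- ===== SOURCE A (Python) =====
-- from typing import Any, Dict, List, Optional, Tuple
-- import unicodedata
--
-- def _norm(s: Any) -> str:
--     if s is None:
--         return ""
--     text = str(s)
--     text = unicodedata.normalize("NFKD", text)
--     text = "".join(ch for ch in text if not unicodedata.combining(ch))
--     return text.strip().lower()
--
-- def _best_option_id(options: List[Tuple[str, str]], candidates: List[str]) -> Optional[str]:
--     """Find best option value text by matching candidates against option names.
--
--     Returns the OPTION TEXT (e.g., "Near Mint"), NOT the option_id!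
--     This is required by Shoper API - it expects text values, not numeric IDs.
--
--     options: list of (option_id, option_value_text) tuples
--     candidates: list of candidate strings to match
--     """
--     if not options:
--         return None
--     # Normalize options once - map normalized text to original text value
--     opt_norm = [(_norm(val), val) for oid, val in options]
--     cands = [_norm(c) for c in candidates if c]
--     for c in cands:
--         # exact match
--         for oname, oval in opt_norm:
--             if oname == c:
--                 return oval  # Return option TEXT value!
--         # contains match (fallback)
--         for oname, oval in opt_norm:
--             if c and c in oname:
--                 return oval  # Return option TEXT value
--     return None
-- ===== SOURCE B (Python) =====
-- from typing import Any, List, Optional, Tuple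
-- import unicodedata
--
-- def _norm(s: Any) -> str:
--     if s is None:
--         return ""
--     text = str(s)
--     text = unicodedata.normalize("NFKD", text)
--     text = "".join(ch for ch in text if not unicodedata.combining(ch))
--     return text.strip().lower()
--
-- def _first_match(oname: str, cands: List[str]) -> Optional[Tuple[int, int]]:
--     """Rank of an option against the candidate list: (index of the first
--     candidate it matches, 0 for exact / 1 for substring), or None."""
--     for i, c in enumerate(cands):
--         if oname == c:
--             return (i, 0)
--         if c and c in oname:
--             return (i, 1)
--     return None
--
-- def _best_option_id(options: List[Tuple[str, str]], candidates: List[str]) -> Optional[str]: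
--     """Single sweep over the OPTIONS: rank each option by the earliest candidate
--     it matches (exact before substring) and keep the lexicographically best rank,
--     first option winning ties."""
--     cands = [_norm(c) for c in candidates if c]
--     best = None  # ((cand_index, kind), option_text)
--     for _, val in options:
--         key = _first_match(_norm(val), cands)
--         if key is not None and (best is None or key < best[0]):
--             best = (key, val)
--     return best[1] if best else None
-- ===== Notes on version B (the rewrite author's own statement) =====
-- stated objective: alternative
-- what changed: Inverts the loop nesting: instead of A's candidate-outer exact-then-contains scans over the options, B sweeps the options once, ranks each option by the earliest candidate it matches (exact before substring) and keeps the lexicographically smallest rank, first option winning ties.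
import Mathlib
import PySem

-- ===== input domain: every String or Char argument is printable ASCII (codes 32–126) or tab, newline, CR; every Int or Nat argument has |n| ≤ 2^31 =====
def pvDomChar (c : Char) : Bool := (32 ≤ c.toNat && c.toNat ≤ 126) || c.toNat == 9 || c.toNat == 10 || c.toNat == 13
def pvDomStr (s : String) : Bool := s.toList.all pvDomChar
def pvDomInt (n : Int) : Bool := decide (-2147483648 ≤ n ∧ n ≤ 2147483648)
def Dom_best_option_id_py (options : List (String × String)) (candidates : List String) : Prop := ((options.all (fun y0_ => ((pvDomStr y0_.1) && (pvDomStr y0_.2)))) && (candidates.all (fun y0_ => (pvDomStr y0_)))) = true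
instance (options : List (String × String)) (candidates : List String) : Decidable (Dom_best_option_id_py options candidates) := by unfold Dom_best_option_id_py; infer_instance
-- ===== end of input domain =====

-- B replaces A's candidate-outer exact-then-contains scans by a single sweep over the options keeping the lexicographically best (candidate-index, match-kind) rank (alternative decomposition, same cost).


-- ===== PORT A =====
-- _norm: on the printable-ASCII domain, NFKD normalization and the combining-mark filter are
-- the identity, so _norm(s) = s.strip().lower(); exact on Dom.
def pvNorm (s : String) : String := PySem.Str.lower (PySem.Str.strip s)

-- A's first inner loop: exact match scan
def pvFindExact (c : String) : List (String × String) → Option String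
  | [] => none
  | (oname, oval) :: rest => if oname = c then some oval else pvFindExact c rest

-- A's second inner loop: contains-match scan ('if c and c in oname')
def pvFindContains (c : String) : List (String × String) → Option String
  | [] => none
  | (oname, oval) :: rest =>
      if c ≠ "" ∧ PySem.Str.isIn c oname then some oval else pvFindContains c rest

-- A's outer loop over the normalized candidates
def pvLoopA (opt_norm : List (String × String)) : List String → Option String
  | [] => none
  | c :: rest =>
      match pvFindExact c opt_norm with
      | some v => some v
      | none =>
        match pvFindContains c opt_norm with
        | some v => some v
        | none => pvLoopA opt_norm rest

def best_option_id_py (options : List (String × String)) (candidates : List String) : Option String :=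
  if options = [] then none
  else
    pvLoopA (options.map (fun p => (pvNorm p.2, p.2)))
            (((candidates.filter (fun c => c ≠ "")).map pvNorm))

-- ===== PORT B =====
-- B's _first_match: rank of one option against the candidate list
-- (index of first matching candidate, 0 = exact / 1 = substring); i carries enumerate's index
def pvFirstMatch (oname : String) (i : Nat) : List String → Option (Nat × Nat)
  | [] => none
  | c :: rest =>
      if oname = c then some (i, 0)
      else if c ≠ "" ∧ PySem.Str.isIn c oname then some (i, 1)
      else pvFirstMatch oname (i+1) rest

-- Python's lexicographic '<' on the (cand_index, kind) rank pairs
def pvKeyLt (a b : Nat × Nat) : Bool := a.1 < b.1 || (a.1 == b.1 && a.2 < b.2)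

-- B's per-option update of the running best (key, value)
def pvUpd (cands : List String) (best : Option ((Nat × Nat) × String)) (p : String × String) :
    Option ((Nat × Nat) × String) :=
  match pvFirstMatch (pvNorm p.2) 0 cands with
  | none => best
  | some k =>
    match best with
    | none => some (k, p.2)
    | some (bk, bv) => if pvKeyLt k bk then some (k, p.2) else some (bk, bv)

def best_option_id_py_alt (options : List (String × String)) (candidates : List String) : Option String :=
  let cands := (candidates.filter (fun c => c ≠ "")).map pvNorm
  (options.foldl (pvUpd cands) none).map (·.2)

-- ===== PRECONDITION & SPEC =====
def Spec_best_option_id_py (options : List (String × String)) (candidates : List String) (out : Option String) : Prop := out = best_option_id_py_alt options candidates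
instance (options : List (String × String)) (candidates : List String) (out : Option String) : Decidable (Spec_best_option_id_py options candidates out) := by unfold Spec_best_option_id_py; infer_instance

-- ===== CLAIM (what is proved, stated in full; the proofs are below) =====
def Claim_equal_best_option_id_py : Prop := ∀ (options : List (String × String)) (candidates : List String), Dom_best_option_id_py options candidates → Spec_best_option_id_py options candidates (best_option_id_py options candidates)

-- ===== LEMMAS AND PROOFS =====

-- minimum-by-rank of the whole option list, recursively from the front (head wins ties)
def pvMerge (x y : Option ((Nat × Nat) × String)) : Option ((Nat × Nat) × String) :=
  match x, y with
  | none, y => y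
  | x, none => x
  | some (k, v), some (k', v') => if pvKeyLt k' k then some (k', v') else some (k, v)

def pvAMin (cands : List String) : List (String × String) → Option ((Nat × Nat) × String)
  | [] => none
  | p :: rest => pvMerge ((pvFirstMatch (pvNorm p.2) 0 cands).map (fun k => (k, p.2))) (pvAMin cands rest)

def pvShift (x : Option ((Nat × Nat) × String)) : Option ((Nat × Nat) × String) :=
  x.map (fun p => ((p.1.1 + 1, p.1.2), p.2))

theorem pvKeyLt_iff (a b : Nat × Nat) : pvKeyLt a b = true ↔ (a.1 < b.1 ∨ (a.1 = b.1 ∧ a.2 < b.2)) := by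
  simp [pvKeyLt]

theorem pvKeyLt_true (a b : Nat × Nat) (h : a.1 < b.1 ∨ (a.1 = b.1 ∧ a.2 < b.2)) : pvKeyLt a b = true :=
  (pvKeyLt_iff a b).mpr h

theorem pvKeyLt_eq_false (a b : Nat × Nat) (h : ¬ (a.1 < b.1 ∨ (a.1 = b.1 ∧ a.2 < b.2))) : pvKeyLt a b = false :=
  Bool.eq_false_iff.mpr (fun hb => h ((pvKeyLt_iff a b).mp hb))

theorem pvKeyLt_top (k : Nat × Nat) : pvKeyLt k (0, 0) = false :=
  pvKeyLt_eq_false _ _ (by show ¬(k.1 < 0 ∨ (k.1 = 0 ∧ k.2 < 0)); omega)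

theorem pvMerge_assoc (a b c : Option ((Nat × Nat) × String)) :
    pvMerge (pvMerge a b) c = pvMerge a (pvMerge b c) := by
  rcases a with _ | ⟨k1, v1⟩ <;> rcases b with _ | ⟨k2, v2⟩ <;> rcases c with _ | ⟨k3, v3⟩ <;>
      (try simp only [pvMerge]) <;> (try split_ifs) <;> (try simp only [pvMerge]) <;> (try split_ifs) <;>
      first
        | rfl
        | (exfalso; simp only [pvKeyLt_iff] at *; omega)

theorem pvUpd_eq_merge (cands : List String) (b : Option ((Nat × Nat) × String)) (p : String × String) :
    pvUpd cands b p = pvMerge b ((pvFirstMatch (pvNorm p.2) 0 cands).map (fun k => (k, p.2))) := by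
  unfold pvUpd pvMerge
  rcases h : pvFirstMatch (pvNorm p.2) 0 cands with _ | k <;> rcases b with _ | ⟨bk, bv⟩ <;> simp

theorem foldl_upd (cands : List String) (os : List (String × String)) (b : Option ((Nat × Nat) × String)) :
    os.foldl (pvUpd cands) b = pvMerge b (pvAMin cands os) := by
  induction os generalizing b with
  | nil => rcases b with _ | ⟨k, v⟩ <;> rfl
  | cons p os ih =>
    rw [List.foldl_cons, ih, pvUpd_eq_merge, pvMerge_assoc]
    rfl

theorem firstMatch_shift (oname : String) (cs : List String) (i : Nat) :
    pvFirstMatch oname i cs = (pvFirstMatch oname 0 cs).map (fun k => (k.1 + i, k.2)) := by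
  induction cs generalizing i with
  | nil => rfl
  | cons c cs ih =>
    simp only [pvFirstMatch]
    split_ifs with h1 h2
    · simp
    · simp
    · rw [ih (i+1), ih 1]
      rcases pvFirstMatch oname 0 cs with _ | k <;> simp <;> omega

theorem pvAMin_nil_cands (os : List (String × String)) : pvAMin [] os = none := by
  induction os with
  | nil => rfl
  | cons p os ih => simp [pvAMin, pvFirstMatch, ih, pvMerge]

-- shape of a head-option rank when the head does not exactly match c
theorem firstMatch_head_ne (oname c : String) (cs : List String) (h : oname ≠ c) (k : Nat × Nat)
    (hk : pvFirstMatch oname 0 (c :: cs) = some k) : k = (0, 1) ∨ 1 ≤ k.1 := by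
  simp only [pvFirstMatch, if_neg h] at hk
  split_ifs at hk with h2
  · exact Or.inl (Option.some.inj hk).symm
  · rw [firstMatch_shift] at hk
    rcases hy : pvFirstMatch oname 0 cs with _ | k0 <;> rw [hy] at hk
    · exact absurd hk (by simp)
    · simp only [Option.map_some] at hk
      right
      rw [← Option.some.inj hk]
      show 1 ≤ k0.1 + (0 + 1)
      omega

theorem pvMerge_top (v : String) (y : Option ((Nat × Nat) × String)) :
    pvMerge (some ((0, 0), v)) y = some ((0, 0), v) := by
  rcases y with _ | ⟨k, w⟩
  · rfl
  · simp only [pvMerge]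
    rw [if_neg (by simp [pvKeyLt_top k])]

theorem lemma_exact (c w : String) (cs : List String) (os : List (String × String))
    (h : pvFindExact c (os.map (fun p => (pvNorm p.2, p.2))) = some w) :
    pvAMin (c :: cs) os = some ((0, 0), w) := by
  induction os with
  | nil => simp [pvFindExact] at h
  | cons p os ih =>
    simp only [List.map_cons, pvFindExact] at h
    simp only [pvAMin]
    by_cases he : pvNorm p.2 = c
    · rw [if_pos he] at h
      have hx : pvFirstMatch (pvNorm p.2) 0 (c :: cs) = some (0, 0) := by
        simp only [pvFirstMatch, if_pos he]
      rw [hx, Option.some.inj h]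
      exact pvMerge_top w _
    · rw [if_neg he] at h
      rw [ih h]
      rcases hx : pvFirstMatch (pvNorm p.2) 0 (c :: cs) with _ | k
      · rfl
      · have hklt : pvKeyLt (0, 0) k = true := by
          rcases firstMatch_head_ne (pvNorm p.2) c cs he k hx with h1 | h1
          · subst h1; rfl
          · exact pvKeyLt_true _ _ (Or.inl (by show 0 < k.1; omega))
        simp only [Option.map_some, pvMerge]
        rw [if_pos hklt]

theorem lemma_no_exact_lb (c : String) (cs : List String) (os : List (String × String))
    (hE : pvFindExact c (os.map (fun p => (pvNorm p.2, p.2))) = none) :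
    ∀ k v, pvAMin (c :: cs) os = some (k, v) → pvKeyLt k (0, 1) = false := by
  induction os with
  | nil => intro k v h; simp [pvAMin] at h
  | cons p os ih =>
    intro k v h
    simp only [List.map_cons, pvFindExact] at hE
    split_ifs at hE with he
    simp only [pvAMin] at h
    rcases hx : pvFirstMatch (pvNorm p.2) 0 (c :: cs) with _ | k0 <;> rw [hx] at h
    · exact ih hE k v h
    · have hk0 : pvKeyLt k0 (0, 1) = false := by
        rcases firstMatch_head_ne (pvNorm p.2) c cs he k0 hx with h1 | h1
        · subst h1; rfl
        · exact pvKeyLt_eq_false _ _ (by show ¬(k0.1 < 0 ∨ (k0.1 = 0 ∧ k0.2 < 1)); omega)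
      simp only [Option.map_some] at h
      rcases ht : pvAMin (c :: cs) os with _ | ⟨k1, v1⟩ <;> rw [ht] at h <;> simp only [pvMerge] at h
      · have hk : k0 = k := congrArg Prod.fst (Option.some.inj h)
        exact hk ▸ hk0
      · have hk1 := ih hE k1 v1 ht
        split_ifs at h with hlt
        · have hk : k1 = k := congrArg Prod.fst (Option.some.inj h)
          exact hk ▸ hk1
        · have hk : k0 = k := congrArg Prod.fst (Option.some.inj h)
          exact hk ▸ hk0

theorem lemma_contains (c w : String) (cs : List String) (os : List (String × String))
    (hE : pvFindExact c (os.map (fun p => (pvNorm p.2, p.2))) = none)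
    (hC : pvFindContains c (os.map (fun p => (pvNorm p.2, p.2))) = some w) :
    pvAMin (c :: cs) os = some ((0, 1), w) := by
  induction os with
  | nil => simp [pvFindContains] at hC
  | cons p os ih =>
    simp only [List.map_cons, pvFindExact] at hE
    simp only [List.map_cons, pvFindContains] at hC
    split_ifs at hE with he
    simp only [pvAMin]
    by_cases hc : c ≠ "" ∧ PySem.Str.isIn c (pvNorm p.2)
    · rw [if_pos hc] at hC
      have hx : pvFirstMatch (pvNorm p.2) 0 (c :: cs) = some (0, 1) := by
        simp only [pvFirstMatch, if_neg he, if_pos hc]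
      rw [hx, Option.some.inj hC]
      rcases ht : pvAMin (c :: cs) os with _ | ⟨k1, v1⟩
      · rfl
      · have hk1 := lemma_no_exact_lb c cs os hE k1 v1 ht
        simp only [Option.map_some, pvMerge]
        rw [if_neg (by rw [hk1]; simp)]
    · rw [if_neg hc] at hC
      rw [ih hE hC]
      have hx : pvFirstMatch (pvNorm p.2) 0 (c :: cs) = pvFirstMatch (pvNorm p.2) (0 + 1) cs := by
        simp only [pvFirstMatch, if_neg he, if_neg hc]
      rw [hx, firstMatch_shift]
      rcases hy : pvFirstMatch (pvNorm p.2) 0 cs with _ | k0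
      · rfl
      · have hklt : pvKeyLt (0, 1) (k0.1 + (0 + 1), k0.2) = true :=
          pvKeyLt_true _ _ (Or.inl (by show 0 < k0.1 + (0 + 1); omega))
        simp only [Option.map_some, pvMerge]
        rw [if_pos hklt]

theorem lemma_shift (c : String) (cs : List String) (os : List (String × String))
    (hE : pvFindExact c (os.map (fun p => (pvNorm p.2, p.2))) = none)
    (hC : pvFindContains c (os.map (fun p => (pvNorm p.2, p.2))) = none) :
    pvAMin (c :: cs) os = pvShift (pvAMin cs os) := by
  induction os with
  | nil => rfl
  | cons p os ih =>
    simp only [List.map_cons, pvFindExact] at hE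
    simp only [List.map_cons, pvFindContains] at hC
    split_ifs at hE with he
    split_ifs at hC with hc
    simp only [pvAMin, ih hE hC]
    have hx : pvFirstMatch (pvNorm p.2) 0 (c :: cs) = pvFirstMatch (pvNorm p.2) (0 + 1) cs := by
      simp only [pvFirstMatch, if_neg he, if_neg hc]
    rw [hx, firstMatch_shift]
    rcases hy : pvFirstMatch (pvNorm p.2) 0 cs with _ | k0 <;>
      rcases ht : pvAMin cs os with _ | ⟨k1, v1⟩ <;> (try rfl)
    simp only [Option.map_some, pvShift, pvMerge, apply_ite]
    have hsh : pvKeyLt (k1.1 + 1, k1.2) (k0.1 + (0 + 1), k0.2) = pvKeyLt k1 k0 := by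
      rw [Bool.eq_iff_iff, pvKeyLt_iff, pvKeyLt_iff]
      show (k1.1 + 1 < k0.1 + (0 + 1) ∨ (k1.1 + 1 = k0.1 + (0 + 1) ∧ k1.2 < k0.2)) ↔ _
      omega
    rw [hsh]
    split_ifs <;> rfl

theorem loopA_eq_aMin (os : List (String × String)) (cs : List String) :
    pvLoopA (os.map (fun p => (pvNorm p.2, p.2))) cs = (pvAMin cs os).map (·.2) := by
  induction cs with
  | nil => simp [pvLoopA, pvAMin_nil_cands]
  | cons c cs ih =>
    simp only [pvLoopA]
    rcases hE : pvFindExact c (os.map (fun p => (pvNorm p.2, p.2))) with _ | w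
    · rcases hC : pvFindContains c (os.map (fun p => (pvNorm p.2, p.2))) with _ | w
      · rw [lemma_shift c cs os hE hC]
        simp only [hE, hC]
        rw [ih]
        rcases pvAMin cs os with _ | ⟨k, v⟩ <;> rfl
      · rw [lemma_contains c w cs os hE hC]
        simp only [hE, hC]
        rfl
    · rw [lemma_exact c w cs os hE]
      simp only [hE]
      rfl

-- ===== VERDICT (by name: the statement is the Claim_ definition above) =====
theorem best_option_id_py_spec : Claim_equal_best_option_id_py := by
  intro options candidates _
  show best_option_id_py options candidates = best_option_id_py_alt options candidates
  have halt : best_option_id_py_alt options candidates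
      = (pvAMin ((candidates.filter (fun c => c ≠ "")).map pvNorm) options).map (·.2) := by
    show (options.foldl (pvUpd ((candidates.filter (fun c => c ≠ "")).map pvNorm)) none).map (·.2) = _
    rw [foldl_upd]
    rfl
  rw [halt]
  unfold best_option_id_py
  by_cases h : options = []
  · subst h; rfl
  · rw [if_neg h, loopA_eq_aMin]
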